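-- pv_equiv track=rewrite | github.com/hugobouigeon/LeMonde_data_visualization | lemonde scraper.py | authorformater
-- ===== SOURCE A (Python) =====
-- def authorformater(s):          #just trying stufff until it works
--     s= s.replace('meta__author--page">','°')
--     out=""
--     deleting = False
--     for x in s:
--         if not deleting:
--             out += x
--         if x =='<':
--             deleting = True
--         if x =='°':
--             deleting = False
--
--     s = out
--     out=""
--     deleting = False
--
--     for x in s:
--         if not deleting:
--             out += x
--         if x =='<':
--             deleting = True
--         if deleting and x == " ":
--             deleting = False
--
--     out = out.replace('<','; ')
--     out = out.replace("' ",' ')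
--     return out
-- ===== SOURCE B (Python) =====
-- def _collapse(s, stop):
--     # keep text up to and including each '<', drop everything after it
--     # through the next `stop` (or to the end if none)
--     parts = []
--     i = 0
--     n = len(s)
--     while True:
--         j = s.find('<', i)
--         if j == -1:
--             parts.append(s[i:])
--             break
--         parts.append(s[i:j + 1])
--         k = s.find(stop, j + 1)
--         i = n if k == -1 else k + 1
--     return ''.join(parts)
--
--
-- def authorformater(s):
--     s = s.replace('meta__author--page">', '\u00b0')
--     s = _collapse(_collapse(s, '\u00b0'), ' ')
--     return s.replace('<', '; ').replace("' ", ' ')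
-- ===== Notes on version B (the rewrite author's own statement) =====
-- stated objective: faster
-- what changed: Replaces A's two char-by-char boolean state-machine passes (with quadratic string concatenation) with chunk-wise scans that jump via str.find to each marker's terminator and join the kept slices once.
import Mathlib
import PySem

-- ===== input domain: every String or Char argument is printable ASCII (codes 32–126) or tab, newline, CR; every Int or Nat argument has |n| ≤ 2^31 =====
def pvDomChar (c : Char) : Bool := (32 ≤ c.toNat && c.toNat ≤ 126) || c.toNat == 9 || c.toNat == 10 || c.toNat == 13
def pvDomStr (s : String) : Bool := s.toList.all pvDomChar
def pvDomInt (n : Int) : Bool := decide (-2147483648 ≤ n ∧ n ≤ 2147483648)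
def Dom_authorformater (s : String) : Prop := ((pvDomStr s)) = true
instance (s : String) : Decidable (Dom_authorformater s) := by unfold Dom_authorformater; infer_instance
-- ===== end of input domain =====

-- B is an idiomatic chunk-wise rewrite: instead of A's two char-by-char boolean
-- state machines it jumps with find() from each '<' to its terminator and joins
-- the kept chunks (same return value; no side effects in either version).

-- ===== PORT A =====
-- two passes: each keeps a char when not deleting, '<' starts deleting, the
-- terminator ('°' resp. a space while deleting) stops deleting
def authorformater (s : String) : String :=
  let s1 := PySem.Str.replace s "meta__author--page\">" "°"
  let r1 := s1.toList.foldl (fun (acc : List Char × Bool) x =>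
      ((if !acc.2 then acc.1 ++ [x] else acc.1),
       (let d := if x = '<' then true else acc.2
        if x = '°' then false else d))) ([], false)
  let r2 := r1.1.foldl (fun (acc : List Char × Bool) x =>
      ((if !acc.2 then acc.1 ++ [x] else acc.1),
       (let d := if x = '<' then true else acc.2
        if d = true ∧ x = ' ' then false else d))) ([], false)
  PySem.Str.replace (PySem.Str.replace (String.mk r2.1) "<" "; ") "' " " "

-- ===== PORT B =====
-- mirror of Source B's `s.find('<', i)`: the chunk up to and including the first '<'
-- (the part appended to `parts`), plus the remainder; none if there is no '<'
def pvSplitLt : List Char → Option (List Char × List Char)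
  | [] => none
  | x :: xs =>
      if x = '<' then some ([x], xs)
      else (pvSplitLt xs).map (fun p => (x :: p.1, p.2))

-- mirror of `k = s.find(stop, j+1); i = n if k == -1 else k+1`
def pvDropThrough (c : Char) : List Char → List Char
  | [] => []
  | x :: xs => if x = c then xs else pvDropThrough c xs

theorem pvDropThrough_length_le (c : Char) : ∀ l : List Char, (pvDropThrough c l).length ≤ l.length := by
  intro l
  induction l with
  | nil => simp [pvDropThrough]
  | cons x xs ih =>
      simp only [pvDropThrough]
      split <;> simp <;> omega

theorem pvSplitLt_rest_lt : ∀ (l p r : List Char), pvSplitLt l = some (p, r) → r.length < l.length := by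
  intro l
  induction l with
  | nil => intro p r h; simp [pvSplitLt] at h
  | cons x xs ih =>
      intro p r h
      simp only [pvSplitLt] at h
      split at h
      · simp at h; simp [h.2]
      · cases hx : pvSplitLt xs with
        | none => rw [hx] at h; simp at h
        | some q =>
            rw [hx] at h; simp at h
            have := ih q.1 q.2 (by rw [hx])
            simp [← h.2]
            omega

-- one iteration of Source B's while loop: emit the chunk through '<', skip through `stop`
def pvCollapse (stop : Char) (l : List Char) : List Char :=
  match h : pvSplitLt l with
  | none => l
  | some (p, r) => p ++ pvCollapse stop (pvDropThrough stop r)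
termination_by l.length
decreasing_by
  exact Nat.lt_of_le_of_lt (pvDropThrough_length_le _ _) (pvSplitLt_rest_lt _ _ _ h)

def authorformater_alt (s : String) : String :=
  let s1 := PySem.Str.replace s "meta__author--page\">" "°"
  let r := pvCollapse ' ' (pvCollapse '°' s1.toList)
  PySem.Str.replace (PySem.Str.replace (String.mk r) "<" "; ") "' " " "

-- ===== PRECONDITION & SPEC =====
def Spec_authorformater (s : String) (out : String) : Prop := out = authorformater_alt s
instance (s : String) (out : String) : Decidable (Spec_authorformater s out) := by unfold Spec_authorformater; infer_instance

-- ===== CLAIM (what is proved, stated in full; the proofs are below) =====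
def Claim_equal_authorformater : Prop := ∀ (s : String), Dom_authorformater s → Spec_authorformater s (authorformater s)

-- ===== LEMMAS AND PROOFS =====

-- the common shape of A's two passes: stop = '°' for pass 1, ' ' for pass 2
def pvGStep (stop : Char) (acc : List Char × Bool) (x : Char) : List Char × Bool :=
  ((if !acc.2 then acc.1 ++ [x] else acc.1),
   (let d := if x = '<' then true else acc.2
    if x = stop then false else d))

theorem pvPass1_eq :
    (fun (acc : List Char × Bool) x =>
      (if (!acc.2) = true then acc.1 ++ [x] else acc.1,
        if x = '°' then false else if x = '<' then true else acc.2)) = pvGStep '°' := by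
  funext acc x
  simp [pvGStep]

theorem pvPass2_eq :
    (fun (acc : List Char × Bool) x =>
      ((if !acc.2 then acc.1 ++ [x] else acc.1),
       (let d := if x = '<' then true else acc.2
        if d = true ∧ x = ' ' then false else d))) = pvGStep ' ' := by
  funext acc x
  simp only [pvGStep]
  by_cases hx : x = ' '
  · subst hx
    cases h2 : acc.2 <;> simp
  · simp [hx]

theorem pvSplitLt_none {l : List Char} (h : pvSplitLt l = none) : '<' ∉ l := by
  induction l with
  | nil => simp
  | cons x xs ih =>
      simp only [pvSplitLt] at h
      split at h
      · simp at h
      · cases hx : pvSplitLt xs with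
        | none => simp [*] at *; tauto
        | some q => rw [hx] at h; simp at h

theorem pvSplitLt_some : ∀ {l p r : List Char}, pvSplitLt l = some (p, r) →
    ∃ q, '<' ∉ q ∧ p = q ++ ['<'] ∧ l = q ++ '<' :: r := by
  intro l
  induction l with
  | nil => intro p r h; simp [pvSplitLt] at h
  | cons x xs ih =>
      intro p r h
      simp only [pvSplitLt] at h
      split at h
      · rename_i hx
        simp at h
        exact ⟨[], by simp, by simp [← h.1, hx], by simp [hx, h.2]⟩
      · rename_i hx
        cases hs : pvSplitLt xs with
        | none => rw [hs] at h; simp at h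
        | some q =>
            rw [hs] at h; simp at h
            obtain ⟨q', hq1, hq2, hq3⟩ := ih (p := q.1) (r := q.2) (by rw [hs])
            refine ⟨x :: q', by simp [hq1]; exact Ne.symm hx, ?_, ?_⟩
            · simp [← h.1, hq2]
            · simp [hq3, h.2]

theorem pvGCopy (stop : Char) : ∀ (q : List Char), '<' ∉ q → ∀ out,
    List.foldl (pvGStep stop) (out, false) q = (out ++ q, false) := by
  intro q
  induction q with
  | nil => simp
  | cons x xs ih =>
      intro hq out
      simp only [List.foldl_cons, pvGStep]
      have hx : x ≠ '<' := by simp at hq; tauto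
      simp only [hx, if_false, Bool.not_false, if_true]
      split
      · rw [ih (by simp at hq; tauto)]; simp
      · rw [ih (by simp at hq; tauto)]; simp

theorem pvGTrue (stop : Char) : ∀ (l : List Char) (out : List Char),
    (List.foldl (pvGStep stop) (out, true) l).1 =
    (List.foldl (pvGStep stop) (out, false) (pvDropThrough stop l)).1 := by
  intro l
  induction l with
  | nil => simp [pvDropThrough]
  | cons x xs ih =>
      intro out
      simp only [List.foldl_cons, pvGStep, pvDropThrough]
      by_cases hx : x = stop
      · simp [hx]
      · simp only [hx, if_false]
        split
        · simp_all
        · simp [ih]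

theorem pvGFalse (stop : Char) (hs : stop ≠ '<') : ∀ (l : List Char) (out : List Char),
    (List.foldl (pvGStep stop) (out, false) l).1 = out ++ pvCollapse stop l := by
  have main : ∀ (n : Nat) (l : List Char), l.length ≤ n → ∀ out,
      (List.foldl (pvGStep stop) (out, false) l).1 = out ++ pvCollapse stop l := by
    intro n
    induction n with
    | zero =>
        intro l hl out
        have : l = [] := by cases l <;> simp_all
        subst this
        simp [pvCollapse, pvSplitLt]
    | succ n ih =>
        intro l hl out
        cases hsp : pvSplitLt l with
        | none =>
            rw [pvCollapse, hsp]
            rw [pvGCopy stop l (pvSplitLt_none hsp)]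
        | some pr =>
            obtain ⟨p, r⟩ := pr
            obtain ⟨q, hq, hp, hl'⟩ := pvSplitLt_some hsp
            rw [pvCollapse, hsp]
            subst hl'
            rw [List.foldl_append, pvGCopy stop q hq]
            simp only [List.foldl_cons, pvGStep]
            simp only [Bool.not_false, if_true, if_pos rfl, if_neg (Ne.symm hs)]
            rw [pvGTrue]
            have hr : r.length < (q ++ '<' :: r).length := by simp; omega
            have hd : (pvDropThrough stop r).length ≤ n := by
              have := pvDropThrough_length_le stop r
              simp at hl
              omega
            rw [ih _ hd]
            simp [hp]
  intro l out
  exact main l.length l (le_refl _) out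

-- ===== VERDICT (by name: the statement is the Claim_ definition above) =====
theorem authorformater_spec : Claim_equal_authorformater := by
  intro s _
  unfold Spec_authorformater authorformater authorformater_alt
  simp only []
  rw [pvPass2_eq, pvPass1_eq]
  rw [pvGFalse '°' (by decide) _ []]
  rw [pvGFalse ' ' (by decide) _ []]
  simp
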